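-- pv_equiv track=rewrite | github.com/EAFIT-AACS/assigment2-athina-cappelletti-simon-tovar | Proyecto 2/ALGORITHM_3_LFCO_2025_AC_ST.py | derivation_tree
-- ===== SOURCE A (Python) =====
-- def derivation_tree(string):
--     """Construye la derivación más a la izquierda para una cadena válida."""
--     derivation = ["S"]
--     step = "S"
--     for _ in range(string.count('a')):  # Se repite según la cantidad de 'a'
--         step = f"a{step}b"
--         derivation.append(step)
--     derivation.append(string)  # Paso final con la cadena generada
--     return derivation
-- ===== SOURCE B (Python) =====
-- def derivation_tree(string):
--     """Construye la derivación más a la izquierda para una cadena válida."""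
--     n = string.count('a')
--     return ['a' * i + 'S' + 'b' * i for i in range(n + 1)] + [string]
-- ===== Notes on version B (the rewrite author's own statement) =====
-- stated objective: simpler
-- what changed: Each derivation step is built directly from its index as a closed-form string (prefix of repeated first symbols, the nonterminal, suffix of repeated last symbols) via a comprehension, instead of growing a running accumulator string across a loop.
import Mathlib
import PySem

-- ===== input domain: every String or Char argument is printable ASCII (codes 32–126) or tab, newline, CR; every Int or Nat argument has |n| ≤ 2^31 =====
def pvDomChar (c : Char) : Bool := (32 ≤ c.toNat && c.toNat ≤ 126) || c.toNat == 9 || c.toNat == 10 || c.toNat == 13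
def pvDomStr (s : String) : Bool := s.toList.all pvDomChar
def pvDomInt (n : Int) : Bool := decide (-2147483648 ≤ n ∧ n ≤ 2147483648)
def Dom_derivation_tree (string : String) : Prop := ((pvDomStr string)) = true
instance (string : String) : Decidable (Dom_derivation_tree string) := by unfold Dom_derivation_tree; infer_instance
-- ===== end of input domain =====

-- B builds each derivation step directly from its index ('a'*i + 'S' + 'b'*i) instead of A's running accumulator string; objective: simpler.

-- ===== PORT A =====
def derivation_tree (string : String) : List String :=
  let res := (PySem.List.pyRange 0 (PySem.Str.count string "a" : Int) 1).foldl
    (fun (st : List String × String) _ =>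
      let step := "a" ++ st.2 ++ "b"
      (st.1 ++ [step], step)) (["S"], "S")
  res.1 ++ [string]

-- ===== PORT B =====
-- 'a'*i + 'S' + 'b'*i
def dtStep (i : Nat) : String := String.ofList (List.replicate i 'a') ++ "S" ++ String.ofList (List.replicate i 'b')

def derivation_tree_alt (string : String) : List String :=
  (List.range (PySem.Str.count string "a" + 1)).map dtStep ++ [string]

-- ===== PRECONDITION & SPEC =====
def Spec_derivation_tree (string : String) (out : List String) : Prop := out = derivation_tree_alt string
instance (string : String) (out : List String) : Decidable (Spec_derivation_tree string out) := by unfold Spec_derivation_tree; infer_instance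

-- ===== CLAIM (what is proved, stated in full; the proofs are below) =====
def Claim_equal_derivation_tree : Prop := ∀ (string : String), Dom_derivation_tree string → Spec_derivation_tree string (derivation_tree string)

-- ===== LEMMAS AND PROOFS =====
theorem dtStep_succ (i : Nat) : "a" ++ dtStep i ++ "b" = dtStep (i + 1) := by
  apply String.ext
  simp [dtStep, List.replicate_succ, List.append_assoc]
  rw [← List.replicate_succ', List.replicate_succ]

theorem dtStep_zero : dtStep 0 = "S" := by decide

theorem dt_fold_spec (L : List Int) (i : Nat) :
    L.foldl (fun (st : List String × String) _ =>
        let step := "a" ++ st.2 ++ "b"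
        (st.1 ++ [step], step)) ((List.range (i + 1)).map dtStep, dtStep i)
      = ((List.range (L.length + i + 1)).map dtStep, dtStep (L.length + i)) := by
  induction L generalizing i with
  | nil => simp
  | cons x t ih =>
      simp only [List.foldl_cons]
      have h1 : ((List.range (i + 1)).map dtStep ++ ["a" ++ dtStep i ++ "b"], "a" ++ dtStep i ++ "b")
          = ((List.range (i + 1 + 1)).map dtStep, dtStep (i + 1)) := by
        rw [dtStep_succ, List.range_succ (n := i + 1), List.range_succ (n := i)]
        simp
      simp only [h1]
      rw [ih (i + 1)]
      have harith : t.length + (i + 1) = (x :: t).length + i := by simp; omega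
      rw [harith]

-- ===== VERDICT (by name: the statement is the Claim_ definition above) =====
theorem derivation_tree_spec : Claim_equal_derivation_tree := by
  intro s _
  unfold Spec_derivation_tree derivation_tree derivation_tree_alt
  have h0 : (["S"], "S") = ((List.range (0 + 1)).map dtStep, dtStep 0) := by
    rw [dtStep_zero]; rfl
  have hlen : (PySem.List.pyRange 0 (PySem.Str.count s "a" : Int) 1).length
      = PySem.Str.count s "a" := by
    rw [PySem.List.length_pyRange_one]; simp
  simp only [h0, dt_fold_spec, hlen]
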